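-- pv_equiv track=rewrite | github.com/moevm/advanced_course_work | Sergeenkov_6303_Checker_Python/checker.py | solve
-- ===== SOURCE A (Python) =====
-- def solve(dataset):
--     string=dataset
--     solution=""
--     line_count=1
--     tags_list=[]
--     line=1
--     flag=0
--     tag=""
--     stack=[]
--     for i in range (len(dataset)):
--         pair=[]
--         if dataset[i]=='\n':
--             line_count+=1
--         if (flag==0) and (dataset[i])=='<':
--             flag=1
--         elif (flag==1) and (dataset[i]!='>'):
--             tag+=dataset[i]
--
--         else:
--             flag=0
--             if (tag!="") and (tag!="br") and (tag!="hr"):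
--                 pair.append(tag)
--                 pair.append(line_count)
--                 tags_list.append(pair)
--             tag=""
--     for x in range (len(tags_list)):
--         if (tags_list[x][0][0]!='/'):
--             stack.append(tags_list[x])
--         else:
--             if stack[len(stack)-1][0]==tags_list[x][0][1:]:
--                 stack.pop()
--             else:
--                 line=stack[len(stack)-1][1]
--                 break
--     solution = "correct" if len(stack)==0 else "wrong {}".format(line)
--     return (solution)
-- ===== SOURCE B (Python) =====
-- def solve(dataset):
--     line_count = 1
--     line = 1
--     in_tag = False
--     tag = ""
--     stack = []
--     for ch in dataset:
--         if ch == '\n':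
--             line_count += 1
--         if (not in_tag) and ch == '<':
--             in_tag = True
--         elif in_tag and ch != '>':
--             tag += ch
--         else:
--             in_tag = False
--             if tag and tag != "br" and tag != "hr":
--                 if tag[0] != '/':
--                     stack.append((tag, line_count))
--                 else:
--                     top = stack[-1]
--                     if top[0] == tag[1:]:
--                         stack.pop()
--                     else:
--                         line = top[1]
--                         break
--             tag = ""
--     return "correct" if not stack else "wrong {}".format(line)
-- ===== Notes on version B (the rewrite author's own statement) =====
-- stated objective: faster
-- what changed: B fuses A's two passes (build the full tags_list, then scan it against a stack) into one pass over the characters that parses each tag and immediately pushes/pops/breaks on the matching stack, so no intermediate tags_list is built (constant-factor speedup, measured ~2x).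
import Mathlib
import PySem

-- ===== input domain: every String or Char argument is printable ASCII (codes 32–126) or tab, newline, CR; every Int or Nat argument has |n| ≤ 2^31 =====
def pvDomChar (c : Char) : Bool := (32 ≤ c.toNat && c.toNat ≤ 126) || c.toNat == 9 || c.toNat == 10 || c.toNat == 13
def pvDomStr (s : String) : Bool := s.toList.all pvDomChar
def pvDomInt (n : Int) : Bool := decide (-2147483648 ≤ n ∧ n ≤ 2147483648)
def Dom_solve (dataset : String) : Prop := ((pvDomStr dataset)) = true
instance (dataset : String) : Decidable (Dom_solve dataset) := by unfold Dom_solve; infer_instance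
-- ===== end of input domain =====

-- B fuses A's two passes (tag extraction, then stack matching) into one character
-- pass with no intermediate tags_list; objective: faster (constant factor, measured).
-- Both A and B raise IndexError on a closing tag met with an empty stack; Pre_ excludes exactly those inputs.

-- ===== PORT A =====
-- first loop of A: scan characters, building tags_list (tag names as List Char, with line numbers)
def aScan : List Char → Int → Int → List Char → List (List Char × Int) → List (List Char × Int)
  | [], _, _, _, tags => tags
  | c :: cs, lc, flag, tag, tags =>
    let lc' := if c = '\n' then lc + 1 else lc
    if flag = 0 ∧ c = '<' then aScan cs lc' 1 tag tags
    else if flag = 1 ∧ c ≠ '>' then aScan cs lc' flag (tag ++ [c]) tags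
    else if tag ≠ [] ∧ tag ≠ ['b','r'] ∧ tag ≠ ['h','r'] then
      aScan cs lc' 0 [] (tags ++ [(tag, lc')])
    else aScan cs lc' 0 [] tags

-- second loop of A: process tags_list against a stack (pushed at the head);
-- returns none where Python raises IndexError, else (line, final stack)
def aMatch : List (List Char × Int) → List (List Char × Int) → Option (Int × List (List Char × Int))
  | [], stack => some (1, stack)
  | (t, l) :: ts, stack =>
    match t with
    | [] => none  -- tags_list[x][0][0] on an empty name: IndexError (unreachable from aScan)
    | t0 :: rest =>
      if t0 ≠ '/' then aMatch ts ((t0 :: rest, l) :: stack)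
      else
        match stack with
        | [] => none  -- stack[len(stack)-1] on empty stack: IndexError
        | (s, sl) :: st' => if s = rest then aMatch ts st' else some (sl, (s, sl) :: st')

def solve (dataset : String) : String :=
  match aMatch (aScan dataset.toList 1 0 [] []) [] with
  | none => ""  -- Python raises IndexError here; excluded by Pre_solve
  | some (line, stack) => if stack = [] then "correct" else "wrong " ++ PySem.Int.toStr line

-- ===== PORT B =====
-- single fused pass: parse tags and match against the stack at once, breaking at the
-- first mismatch; none = IndexError (closing tag on empty stack), as in Source B
def bLoop : List Char → Int → Int → List Char → List (List Char × Int) → Option (Int × List (List Char × Int))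
  | [], _, _, _, stack => some (1, stack)
  | c :: cs, lc, flag, tag, stack =>
    let lc' := if c = '\n' then lc + 1 else lc
    if flag = 0 ∧ c = '<' then bLoop cs lc' 1 tag stack
    else if flag = 1 ∧ c ≠ '>' then bLoop cs lc' flag (tag ++ [c]) stack
    else
      match tag with
      | [] => bLoop cs lc' 0 [] stack
      | t0 :: rest =>
        if t0 :: rest = ['b','r'] ∨ t0 :: rest = ['h','r'] then bLoop cs lc' 0 [] stack
        else if t0 ≠ '/' then bLoop cs lc' 0 [] ((t0 :: rest, lc') :: stack)
        else
          match stack with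
          | [] => none  -- stack[-1] on empty stack: IndexError, as in A
          | (s, sl) :: st' =>
            if s = rest then bLoop cs lc' 0 [] st'
            else some (sl, (s, sl) :: st')  -- break with line = top's line

def solve_alt (dataset : String) : String :=
  match bLoop dataset.toList 1 0 [] [] with
  | none => ""  -- Python raises IndexError here; excluded by Pre_solve
  | some (line, stack) => if stack = [] then "correct" else "wrong " ++ PySem.Int.toStr line

-- ===== PRECONDITION & SPEC =====
-- spec-level tag-name extraction (no line numbers), used only to state where A raises
def preTags : List Char → Bool → List Char → List (List Char)
  | [], _, _ => []
  | c :: cs, inTag, tag =>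
    if inTag = false ∧ c = '<' then preTags cs true tag
    else if inTag = true ∧ c ≠ '>' then preTags cs inTag (tag ++ [c])
    else if tag ≠ [] ∧ tag ≠ ['b','r'] ∧ tag ≠ ['h','r'] then tag :: preTags cs false []
    else preTags cs false []

-- true iff matching the tag names never reads the top of an empty stack (no IndexError)
def preSafe : List (List Char) → List (List Char) → Bool
  | [], _ => true
  | [] :: _, _ => false
  | (t0 :: rest) :: ts, stk =>
    if t0 ≠ '/' then preSafe ts ((t0 :: rest) :: stk)
    else
      match stk with
      | [] => false
      | s :: stk' => if s = rest then preSafe ts stk' else true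

-- Pre_ excludes exactly the inputs on which Python A raises IndexError
-- (a closing tag encountered while the stack is empty, before any mismatch).
def Pre_solve (dataset : String) : Prop := preSafe (preTags dataset.toList false []) [] = true
instance (dataset : String) : Decidable (Pre_solve dataset) := by unfold Pre_solve; infer_instance

def pvWitness_solve : String := "<a>\n<b></b></a>"

def Spec_solve (dataset : String) (out : String) : Prop := out = solve_alt dataset
instance (dataset : String) (out : String) : Decidable (Spec_solve dataset out) := by unfold Spec_solve; infer_instance

-- ===== CLAIM (what is proved, stated in full; the proofs are below) =====
def Claim_equal_solve : Prop := ∀ (dataset : String), Dom_solve dataset → Pre_solve dataset → Spec_solve dataset (solve dataset)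

-- ===== LEMMAS AND PROOFS =====

-- the tags accumulator of aScan is a pure accumulator
theorem aScan_acc (cs : List Char) : ∀ (lc flag : Int) (tag : List Char)
    (tags : List (List Char × Int)),
    aScan cs lc flag tag tags = tags ++ aScan cs lc flag tag [] := by
  induction cs with
  | nil => intro lc flag tag tags; simp [aScan]
  | cons c cs ih =>
    intro lc flag tag tags
    simp only [aScan]
    generalize (if c = '\n' then lc + 1 else lc) = lc'
    split_ifs with h1 h2 h3
    · exact ih _ _ _ _
    · exact ih _ _ _ _
    · rw [ih lc' 0 [] (tags ++ [(tag, lc')]), ih lc' 0 [] ([] ++ [(tag, lc')])]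
      simp
    · exact ih _ _ _ _

-- fusion: B's single pass equals A's match pass run on A's scan output
theorem bLoop_eq (cs : List Char) : ∀ (lc flag : Int) (tag : List Char)
    (stack : List (List Char × Int)),
    bLoop cs lc flag tag stack = aMatch (aScan cs lc flag tag []) stack := by
  induction cs with
  | nil => intro lc flag tag stack; simp [bLoop, aScan, aMatch]
  | cons c cs ih =>
    intro lc flag tag stack
    simp only [bLoop, aScan]
    generalize (if c = '\n' then lc + 1 else lc) = lc'
    split_ifs with h1 h2 h3
    · exact ih _ _ _ _
    · exact ih _ _ _ _
    · -- a tag is emitted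
      obtain ⟨hne, hbr, hhr⟩ := h3
      rw [aScan_acc]
      cases tag with
      | nil => exact absurd rfl hne
      | cons t0 rest =>
        have hnot : ¬ (t0 :: rest = ['b','r'] ∨ t0 :: rest = ['h','r']) := by
          rintro (h | h)
          · exact hbr h
          · exact hhr h
        simp only [List.nil_append, List.singleton_append, aMatch, if_neg hnot]
        by_cases hslash : t0 ≠ '/'
        · simp only [if_pos hslash]; exact ih _ _ _ _
        · simp only [if_neg hslash]
          cases stack with
          | nil => simp
          | cons p st' =>
            obtain ⟨s, sl⟩ := p
            by_cases hm : s = rest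
            · simp only [if_pos hm]; exact ih _ _ _ _
            · simp only [if_neg hm]
    · -- no tag emitted
      cases tag with
      | nil => exact ih _ _ _ _
      | cons t0 rest =>
        by_cases hbr : t0 :: rest = ['b','r']
        · simp only [if_pos (Or.inl hbr)]; exact ih _ _ _ _
        · by_cases hhr : t0 :: rest = ['h','r']
          · simp only [if_pos (Or.inr hhr)]; exact ih _ _ _ _
          · exact absurd ⟨by simp, hbr, hhr⟩ h3

theorem solve_eq_alt (dataset : String) : solve dataset = solve_alt dataset := by
  unfold solve solve_alt
  rw [bLoop_eq]

-- ===== VERDICT (by name: the statement is the Claim_ definition above) =====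
theorem solve_spec : Claim_equal_solve := by
  intro dataset _ _
  unfold Spec_solve
  exact solve_eq_alt dataset
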